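-- pv_equiv track=rewrite | github.com/DurianLAB/hetzner-to-eks | convert_diagrams.py | create_title_from_context
-- ===== SOURCE A (Python) =====
-- def create_title_from_context(content, index, block_preview):
--     """Create a descriptive filename from context."""
--     lines = content.split('\n')
--
--     for i in range(len(lines)-1, -1, -1):
--         line = lines[i].strip()
--         if line.startswith('###'):
--             title = line.lstrip('#').strip().lower().replace(' ', '-').replace('/', '-')
--             return f"{index:02d}-{title}"
--         elif line.startswith('##'):
--             title = line.lstrip('#').strip().lower().replace(' ', '-').replace('/', '-')
--             return f"{index:02d}-{title}"
--
--     preview = block_preview[:30].replace('\n', ' ').replace(':', '').replace('/', '-')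
--     preview = ''.join(c for c in preview if c.isalnum() or c == ' ')
--     preview = preview.strip().replace(' ', '-')[:30]
--     return f"{index:02d}-{preview}"
-- ===== SOURCE B (Python) =====
-- def _slug(line):
--     return line.lstrip('#').strip().lower().replace(' ', '-').replace('/', '-')
--
-- def create_title_from_context(content, index, block_preview):
--     """Create a descriptive filename from context."""
--     title = None
--     for line in content.split('\n'):
--         s = line.strip()
--         if s.startswith('##'):
--             title = _slug(s)
--     if title is not None:
--         return f"{index:02d}-{title}"
--     preview = block_preview[:30].replace('\n', ' ').replace(':', '').replace('/', '-')
--     preview = ''.join(c for c in preview if c.isalnum() or c == ' ')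
--     preview = preview.strip().replace(' ', '-')[:30]
--     return f"{index:02d}-{preview}"
-- ===== Notes on version B (the rewrite author's own statement) =====
-- stated objective: simpler
-- what changed: Replaced A's backward index scan (range(len-1,-1,-1) with early return and two duplicated '###'/'##' branches) by a single forward pass that remembers the slug of the most recently seen '##' heading, then formats it or falls back to the preview block.
import Mathlib
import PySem

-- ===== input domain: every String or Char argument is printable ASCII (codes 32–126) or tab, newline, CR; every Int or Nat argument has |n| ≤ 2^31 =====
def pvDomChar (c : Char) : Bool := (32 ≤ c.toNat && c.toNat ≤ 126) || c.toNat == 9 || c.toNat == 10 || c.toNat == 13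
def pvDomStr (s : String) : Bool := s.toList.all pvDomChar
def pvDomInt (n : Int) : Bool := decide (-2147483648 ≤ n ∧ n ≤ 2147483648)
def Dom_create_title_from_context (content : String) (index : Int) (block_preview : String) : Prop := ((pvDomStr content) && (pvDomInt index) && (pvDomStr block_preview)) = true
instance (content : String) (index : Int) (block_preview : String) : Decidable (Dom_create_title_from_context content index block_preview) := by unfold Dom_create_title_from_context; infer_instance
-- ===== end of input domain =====

-- B replaces A's backward index scan with early return by a single forward pass that
-- remembers the last heading seen (objective: simpler — one pass, merged branches).
-- Notes on the ports: f"{index:02d}" is ported as zfill 2 of str(index) (exact for ints);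
-- line.lstrip('#') is ported as List.dropWhile (· == '#') (exact for a one-char strip set).

-- ===== PORT A =====
-- A's loop 'for i in range(len(lines)-1, -1, -1)' with early returns, transliterated as
-- recursion over the pyRange index list; both heading branches keep A's duplicated body.
def pvLoopA (lines : List (List Char)) (index : Int) (block_preview : String) : List Int → String
  | [] =>
      let p0 := PySem.Chars.replace (PySem.Chars.replace (PySem.Chars.replace
                  (PySem.List.slice block_preview.toList none (some 30)) ['\n'] [' ']) [':'] []) ['/'] ['-']
      let p1 := p0.filter (fun c => PySem.Chars.isalnum c || c == ' ')
      let p2 := PySem.List.slice (PySem.Chars.replace (PySem.Chars.strip p1) [' '] ['-']) none (some 30)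
      String.mk (PySem.Chars.zfill (PySem.Int.toChars index) 2 ++ '-' :: p2)
  | i :: rest =>
      if PySem.Chars.startswith (PySem.Chars.strip (PySem.List.pyGetD lines i [])) ['#','#','#'] then
        String.mk (PySem.Chars.zfill (PySem.Int.toChars index) 2 ++ '-' ::
          PySem.Chars.replace (PySem.Chars.replace (PySem.Chars.lower
            (PySem.Chars.strip ((PySem.Chars.strip (PySem.List.pyGetD lines i [])).dropWhile (· == '#')))) [' '] ['-']) ['/'] ['-'])
      else if PySem.Chars.startswith (PySem.Chars.strip (PySem.List.pyGetD lines i [])) ['#','#'] then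
        String.mk (PySem.Chars.zfill (PySem.Int.toChars index) 2 ++ '-' ::
          PySem.Chars.replace (PySem.Chars.replace (PySem.Chars.lower
            (PySem.Chars.strip ((PySem.Chars.strip (PySem.List.pyGetD lines i [])).dropWhile (· == '#')))) [' '] ['-']) ['/'] ['-'])
      else pvLoopA lines index block_preview rest

def create_title_from_context (content : String) (index : Int) (block_preview : String) : String :=
  let lines := PySem.Chars.splitOn content.toList ['\n']
  pvLoopA lines index block_preview (PySem.List.pyRange ((lines.length : Int) - 1) (-1) (-1))

-- ===== PORT B =====
-- line.lstrip('#').strip().lower().replace(' ', '-').replace('/', '-')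
def pvSlug (s : List Char) : List Char :=
  PySem.Chars.replace (PySem.Chars.replace (PySem.Chars.lower
    (PySem.Chars.strip (s.dropWhile (· == '#')))) [' '] ['-']) ['/'] ['-']

-- f"{index:02d}-{body}"
def pvFileB (index : Int) (body : List Char) : String :=
  String.mk (PySem.Chars.zfill (PySem.Int.toChars index) 2 ++ '-' :: body)

-- the preview-building block
def pvPreviewB (block_preview : String) : List Char :=
  let p0 := PySem.Chars.replace (PySem.Chars.replace (PySem.Chars.replace
              (PySem.List.slice block_preview.toList none (some 30)) ['\n'] [' ']) [':'] []) ['/'] ['-']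
  let p1 := p0.filter (fun c => PySem.Chars.isalnum c || c == ' ')
  PySem.List.slice (PySem.Chars.replace (PySem.Chars.strip p1) [' '] ['-']) none (some 30)

-- B's forward pass: remember the slug of the most recently seen heading line
def pvLastTitle : List (List Char) → Option (List Char) → Option (List Char)
  | [], acc => acc
  | l :: rest, acc =>
      pvLastTitle rest (if PySem.Chars.startswith (PySem.Chars.strip l) ['#','#'] then
        some (pvSlug (PySem.Chars.strip l)) else acc)

def create_title_from_context_alt (content : String) (index : Int) (block_preview : String) : String :=
  match pvLastTitle (PySem.Chars.splitOn content.toList ['\n']) none with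
  | some t => pvFileB index t
  | none => pvFileB index (pvPreviewB block_preview)

-- ===== PRECONDITION & SPEC =====
def Spec_create_title_from_context (content : String) (index : Int) (block_preview : String) (out : String) : Prop := out = create_title_from_context_alt content index block_preview
instance (content : String) (index : Int) (block_preview : String) (out : String) : Decidable (Spec_create_title_from_context content index block_preview out) := by unfold Spec_create_title_from_context; infer_instance

-- ===== CLAIM (what is proved, stated in full; the proofs are below) =====
def Claim_equal_create_title_from_context : Prop := ∀ (content : String) (index : Int) (block_preview : String), Dom_create_title_from_context content index block_preview → Spec_create_title_from_context content index block_preview (create_title_from_context content index block_preview)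

-- ===== LEMMAS AND PROOFS =====

-- the heading test both programs apply to a raw line
def pvTest (l : List Char) : Bool := PySem.Chars.startswith (PySem.Chars.strip l) ['#','#']

theorem pvStartswith_hhh {s : List Char} (h : PySem.Chars.startswith s ['#','#','#'] = true) :
    PySem.Chars.startswith s ['#','#'] = true := by
  rw [PySem.Chars.startswith_iff] at h ⊢
  exact List.IsPrefix.trans (by decide) h

-- A's loop over a list of in-range indices returns the first heading hit, else the preview name
theorem pvLoopA_eq (lines : List (List Char)) (index : Int) (bp : String) (is : List Int)
    (h : ∀ i ∈ is, 0 ≤ i ∧ i.toNat < lines.length) :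
    pvLoopA lines index bp is =
      match (is.map (fun i => lines.getD i.toNat [])).find? pvTest with
      | some l => pvFileB index (pvSlug (PySem.Chars.strip l))
      | none => pvFileB index (pvPreviewB bp) := by
  induction is with
  | nil => rfl
  | cons i rest ih =>
      obtain ⟨h0, _⟩ := h i (by simp)
      have hg : PySem.List.pyGetD lines i [] = lines.getD i.toNat [] := by
        rw [← PySem.List.pyGetD_natCast lines i.toNat, Int.toNat_of_nonneg h0]
      rw [List.map_cons, List.find?_cons]
      unfold pvLoopA
      rw [hg]
      cases h2 : pvTest (lines.getD i.toNat []) with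
      | true =>
          unfold pvTest at h2
          by_cases h3 : PySem.Chars.startswith (PySem.Chars.strip (lines.getD i.toNat [])) ['#','#','#'] = true
          · rw [if_pos h3]; rfl
          · rw [if_neg h3, if_pos h2]; rfl
      | false =>
          unfold pvTest at h2
          have h3 : PySem.Chars.startswith (PySem.Chars.strip (lines.getD i.toNat [])) ['#','#','#'] = false := by
            cases hb : PySem.Chars.startswith (PySem.Chars.strip (lines.getD i.toNat [])) ['#','#','#'] with
            | false => rfl
            | true => rw [pvStartswith_hhh hb] at h2; exact absurd h2 (by simp)
          have h3' : ¬ (PySem.Chars.startswith (PySem.Chars.strip (lines.getD i.toNat [])) ['#','#','#'] = true) := by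
            rw [h3]; simp
          have h2' : ¬ (PySem.Chars.startswith (PySem.Chars.strip (lines.getD i.toNat [])) ['#','#'] = true) := by
            rw [h2]; simp
          rw [if_neg h3', if_neg h2']
          exact ih (fun j hj => h j (by simp [hj]))

-- the descending pyRange is the descending affine image of range
theorem pvPyRange_desc (n : Nat) :
    PySem.List.pyRange ((n : Int) - 1) (-1) (-1) = (List.range n).map (fun k : Nat => ((n : Int) - 1 - (k : Int))) := by
  rcases Nat.eq_zero_or_pos n with hn | hn
  · subst hn; decide
  · simp only [PySem.List.pyRange]
    rw [if_neg (by norm_num), if_neg (by norm_num), if_pos (by omega : (-1:Int) < (n:Int) - 1)]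
    have hc : (((n:Int) - 1 - -1 + - -1 - 1) / - -1) = (n:Int) := by norm_num
    rw [hc, Int.toNat_natCast]
    exact List.map_congr_left (fun k _ => by ring)

-- fetching lines at indices n-1, …, 0 yields the reversed list
theorem pvDescFetch (lines : List (List Char)) :
    ((List.range lines.length).map (fun k : Nat => ((lines.length : Int) - 1 - (k : Int)))).map
      (fun i => lines.getD i.toNat []) = lines.reverse := by
  rw [List.map_map]
  apply List.ext_getElem (by simp)
  intro j hj hj'
  simp only [List.getElem_map, List.getElem_range, Function.comp_apply, List.getElem_reverse]
  have hlen : j < lines.length := by simpa using hj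
  have ht : ((lines.length : Int) - 1 - (j : Int)).toNat = lines.length - 1 - j := by omega
  rw [ht, List.getD_eq_getElem _ _ (by omega)]

-- B's forward pass keeps the slug of the LAST heading = first heading of the reversed list
theorem pvLastTitle_eq (ls : List (List Char)) (acc : Option (List Char)) :
    pvLastTitle ls acc =
      (Option.map (fun l => pvSlug (PySem.Chars.strip l)) (ls.reverse.find? pvTest)).or acc := by
  induction ls generalizing acc with
  | nil => rfl
  | cons l rest ih =>
      show pvLastTitle rest _ = _
      rw [ih, List.reverse_cons, List.find?_append, Option.map_or, Option.or_assoc]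
      congr 1
      cases hb : PySem.Chars.startswith (PySem.Chars.strip l) ['#','#'] with
      | false => simp [List.find?, pvTest, hb]
      | true => simp [List.find?, pvTest, hb]

-- ===== VERDICT (by name: the statement is the Claim_ definition above) =====
theorem create_title_from_context_spec : Claim_equal_create_title_from_context := by
  intro content index block_preview _
  unfold Spec_create_title_from_context create_title_from_context create_title_from_context_alt
  set lines := PySem.Chars.splitOn content.toList ['\n'] with hl
  rw [pvLastTitle_eq, Option.or_none,
      pvLoopA_eq lines index block_preview _
        (by
          intro i hi
          rw [pvPyRange_desc lines.length] at hi
          obtain ⟨k, hk, rfl⟩ := List.mem_map.mp hi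
          rw [List.mem_range] at hk
          omega),
      pvPyRange_desc lines.length, pvDescFetch lines]
  cases lines.reverse.find? pvTest <;> rfl
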